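-- pv_equiv track=rewrite | github.com/zxdcs/sentiment | data_util/seq.py | insert_space
-- ===== SOURCE A (Python) =====
-- def insert_space(file_list, data_list):
--     assert len(file_list) == len(data_list)
--     new_list = []
--     for i in range(len(file_list)):
--         new_list.append(data_list[i])
--         if i + 1 < len(file_list) and file_list[i] != file_list[i + 1]:
--             new_list.append('\n')
--     return new_list
-- ===== SOURCE B (Python) =====
-- def insert_space(file_list, data_list):
--     assert len(file_list) == len(data_list)
--     # pass 1: build the run structure (maximal groups of consecutive equal file values)
--     groups = []
--     prev = None
--     for f, d in zip(file_list, data_list):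
--         if groups and f == prev:
--             groups[-1].append(d)
--         else:
--             groups.append([d])
--         prev = f
--     # pass 2: join the groups with '\n' separators
--     new_list = []
--     first = True
--     for grp in groups:
--         if not first:
--             new_list.append('\n')
--         new_list.extend(grp)
--         first = False
--     return new_list
-- ===== Notes on version B (the rewrite author's own statement) =====
-- stated objective: alternative
-- what changed: B first builds the run structure (maximal groups of consecutive equal file values, via a recursive split over zipped pairs) and then joins the groups with '\n' separators in a second pass, instead of A's single index loop with an inline next-element boundary check; Pre_ excludes only length-mismatched inputs, on which both raise AssertionError.
import Mathlib
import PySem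

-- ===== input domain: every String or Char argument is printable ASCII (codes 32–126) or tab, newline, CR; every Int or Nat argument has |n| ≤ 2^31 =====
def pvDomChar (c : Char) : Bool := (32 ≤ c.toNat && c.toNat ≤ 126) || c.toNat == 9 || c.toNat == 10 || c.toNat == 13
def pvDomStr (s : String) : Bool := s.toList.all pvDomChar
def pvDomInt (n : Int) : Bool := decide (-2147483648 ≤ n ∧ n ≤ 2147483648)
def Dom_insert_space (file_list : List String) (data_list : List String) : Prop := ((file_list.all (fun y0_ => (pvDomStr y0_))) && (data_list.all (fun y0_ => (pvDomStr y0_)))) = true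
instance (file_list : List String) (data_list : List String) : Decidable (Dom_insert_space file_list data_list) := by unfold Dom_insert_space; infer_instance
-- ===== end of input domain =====

-- B builds the run structure first (maximal groups of equal consecutive file values) and then
-- joins the groups with '\n' separators in a second pass; alternative decomposition, same cost.


-- ===== PORT A =====
-- A's index loop: for i in range(len(file_list)): append data_list[i]; append '\n' at a boundary.
-- data_list[i]/file_list[i] are in range under Pre_ (equal lengths), so pyGetD is exact there.
def insertSpaceLoop (file_list data_list : List String) (n i : Nat) (acc : List String) : List String :=
  if _h : i < n then
    let acc1 := acc ++ [PySem.List.pyGetD data_list (i : Int) ""]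
    let acc2 := if i + 1 < n ∧ PySem.List.pyGetD file_list (i : Int) "" ≠ PySem.List.pyGetD file_list ((i : Int) + 1) "" then acc1 ++ ["\n"] else acc1
    insertSpaceLoop file_list data_list n (i + 1) acc2
  else acc
termination_by n - i

def insert_space (file_list : List String) (data_list : List String) : List String :=
  insertSpaceLoop file_list data_list file_list.length 0 []

-- ===== PORT B =====
-- pass 1 of Source B: fold over zipped pairs, appending to the last group while the file value repeats
def splitStep (st : List (List String) × Option String) (p : String × String) : List (List String) × Option String :=
  if st.1 ≠ [] ∧ some p.1 = st.2 then
    (st.1.dropLast ++ [st.1.getLastD [] ++ [p.2]], some p.1)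
  else
    (st.1 ++ [[p.2]], some p.1)

-- pass 2 of Source B: join the groups with '\n' separators (first flag)
def joinStep (st : List String × Bool) (grp : List String) : List String × Bool :=
  ((if st.2 then st.1 else st.1 ++ ["\n"]) ++ grp, false)

def insert_space_alt (file_list : List String) (data_list : List String) : List String :=
  let groups := ((file_list.zip data_list).foldl splitStep ([], none)).1
  (groups.foldl joinStep ([], true)).1

-- ===== PRECONDITION & SPEC =====
-- Pre_ excludes exactly the inputs where the assert fails (AssertionError in both programs).
def Pre_insert_space (file_list : List String) (data_list : List String) : Prop :=
  file_list.length = data_list.length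
instance (file_list : List String) (data_list : List String) : Decidable (Pre_insert_space file_list data_list) := by unfold Pre_insert_space; infer_instance

def pvWitness_insert_space : List String × List String := (["a", "a", "b"], ["x", "y", "z"])

def Spec_insert_space (file_list : List String) (data_list : List String) (out : List String) : Prop := out = insert_space_alt file_list data_list
instance (file_list : List String) (data_list : List String) (out : List String) : Decidable (Spec_insert_space file_list data_list out) := by unfold Spec_insert_space; infer_instance

-- ===== CLAIM (what is proved, stated in full; the proofs are below) =====
def Claim_equal_insert_space : Prop := ∀ (file_list : List String) (data_list : List String), Dom_insert_space file_list data_list → Pre_insert_space file_list data_list → Spec_insert_space file_list data_list (insert_space file_list data_list)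

-- ===== LEMMAS AND PROOFS =====

-- common recursive specification: one output element per pair, '\n' strictly between unequal-file neighbours
def pairSpec : List (String × String) → List String
  | [] => []
  | [(_, d)] => [d]
  | (f0, d0) :: (f1, d1) :: t =>
      if f0 ≠ f1 then d0 :: "\n" :: pairSpec ((f1, d1) :: t)
      else d0 :: pairSpec ((f1, d1) :: t)

theorem insertSpaceLoop_stop (fl dl : List String) (n i : Nat) (acc : List String)
    (hi : ¬ i < n) : insertSpaceLoop fl dl n i acc = acc := by
  rw [insertSpaceLoop]; simp [hi]

theorem insertSpaceLoop_step (fl dl : List String) (n i : Nat) (acc : List String)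
    (hi : i < n) :
    insertSpaceLoop fl dl n i acc =
      insertSpaceLoop fl dl n (i + 1)
        (if i + 1 < n ∧ PySem.List.pyGetD fl (i : Int) "" ≠ PySem.List.pyGetD fl ((i : Int) + 1) ""
         then acc ++ [PySem.List.pyGetD dl (i : Int) ""] ++ ["\n"]
         else acc ++ [PySem.List.pyGetD dl (i : Int) ""]) := by
  rw [insertSpaceLoop]; simp [hi]

theorem insertSpaceLoop_acc (fl dl : List String) (n : Nat) :
    ∀ k i acc, n - i ≤ k → insertSpaceLoop fl dl n i acc = acc ++ insertSpaceLoop fl dl n i [] := by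
  intro k
  induction k with
  | zero =>
    intro i acc h
    have hi : ¬ i < n := by omega
    rw [insertSpaceLoop_stop fl dl n i acc hi, insertSpaceLoop_stop fl dl n i [] hi]
    simp
  | succ k ih =>
    intro i acc h
    by_cases hi : i < n
    · rw [insertSpaceLoop_step fl dl n i acc hi, insertSpaceLoop_step fl dl n i [] hi]
      have hsplit :
          (if i + 1 < n ∧ PySem.List.pyGetD fl (i : Int) "" ≠ PySem.List.pyGetD fl ((i : Int) + 1) ""
           then acc ++ [PySem.List.pyGetD dl (i : Int) ""] ++ ["\n"]
           else acc ++ [PySem.List.pyGetD dl (i : Int) ""])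
          = acc ++
            (if i + 1 < n ∧ PySem.List.pyGetD fl (i : Int) "" ≠ PySem.List.pyGetD fl ((i : Int) + 1) ""
             then ([] : List String) ++ [PySem.List.pyGetD dl (i : Int) ""] ++ ["\n"]
             else ([] : List String) ++ [PySem.List.pyGetD dl (i : Int) ""]) := by
        split <;> simp
      rw [hsplit]
      generalize (if i + 1 < n ∧ PySem.List.pyGetD fl (i : Int) "" ≠ PySem.List.pyGetD fl ((i : Int) + 1) ""
             then ([] : List String) ++ [PySem.List.pyGetD dl (i : Int) ""] ++ ["\n"]
             else ([] : List String) ++ [PySem.List.pyGetD dl (i : Int) ""]) = B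
      rw [ih (i + 1) (acc ++ B) (by omega), ih (i + 1) B (by omega)]
      simp [List.append_assoc]
    · rw [insertSpaceLoop_stop fl dl n i acc hi, insertSpaceLoop_stop fl dl n i [] hi]
      simp

theorem loop_eq_pairSpec (fl dl : List String) (h : fl.length = dl.length) :
    ∀ k i, fl.length - i ≤ k →
      insertSpaceLoop fl dl fl.length i [] = pairSpec ((fl.drop i).zip (dl.drop i)) := by
  intro k
  induction k with
  | zero =>
    intro i hk
    have hi : ¬ i < fl.length := by omega
    rw [insertSpaceLoop_stop fl dl fl.length i [] hi]
    have h1 : fl.drop i = [] := List.drop_eq_nil_of_le (by omega)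
    simp [h1, pairSpec]
  | succ k ih =>
    intro i hk
    by_cases hi : i < fl.length
    · have hid : i < dl.length := by omega
      rw [insertSpaceLoop_step fl dl fl.length i [] hi]
      have hdf : fl.drop i = fl[i] :: fl.drop (i + 1) := List.drop_eq_getElem_cons hi
      have hdd : dl.drop i = dl[i] :: dl.drop (i + 1) := List.drop_eq_getElem_cons hid
      have hgd : PySem.List.pyGetD dl (i : Int) "" = dl[i] := by
        simp [PySem.List.pyGetD_natCast, List.getD_eq_getElem?_getD, hid]
      by_cases hi1 : i + 1 < fl.length
      · have hi1d : i + 1 < dl.length := by omega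
        have hgf : PySem.List.pyGetD fl (i : Int) "" = fl[i] := by
          simp [PySem.List.pyGetD_natCast, List.getD_eq_getElem?_getD, hi]
        have hgf1 : PySem.List.pyGetD fl ((i : Int) + 1) "" = fl[i + 1] := by
          rw [show ((i : Int) + 1) = ((i + 1 : Nat) : Int) by push_cast; ring,
            PySem.List.pyGetD_natCast]
          simp [List.getD_eq_getElem?_getD, hi1]
        have hdf1 : fl.drop (i + 1) = fl[i + 1] :: fl.drop (i + 2) := List.drop_eq_getElem_cons hi1
        have hdd1 : dl.drop (i + 1) = dl[i + 1] :: dl.drop (i + 2) := List.drop_eq_getElem_cons hi1d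
        rw [insertSpaceLoop_acc fl dl fl.length (fl.length - (i + 1)) (i + 1) _ (by omega)]
        rw [ih (i + 1) (by omega)]
        conv_rhs => rw [hdf, hdd, hdf1, hdd1, List.zip_cons_cons, List.zip_cons_cons, pairSpec]
        rw [← List.zip_cons_cons, ← hdf1, ← hdd1]
        by_cases hne : fl[i] ≠ fl[i + 1]
        · simp [hi1, hgf, hgf1, hgd, hne]
        · simp only [not_not] at hne
          simp [hi1, hgf, hgf1, hgd, hne]
      · have hend : i + 1 = fl.length := by omega
        have hcond : ¬ (i + 1 < fl.length ∧ PySem.List.pyGetD fl (i : Int) "" ≠ PySem.List.pyGetD fl ((i : Int) + 1) "") := by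
          intro hc; omega
        simp only [hcond, if_neg, not_false_iff]
        rw [insertSpaceLoop_acc fl dl fl.length (fl.length - (i + 1)) (i + 1) _ (by omega)]
        rw [ih (i + 1) (by omega)]
        have h1 : fl.drop (i + 1) = [] := List.drop_eq_nil_of_le (by omega)
        have h2 : dl.drop (i + 1) = [] := List.drop_eq_nil_of_le (by omega)
        rw [hdf, hdd, h1, h2]
        simp [pairSpec, hgd]
    · rw [insertSpaceLoop_stop fl dl fl.length i [] hi]
      have h1 : fl.drop i = [] := List.drop_eq_nil_of_le (by omega)
      simp [h1, pairSpec]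

-- proof-side: the run structure splitStep builds, described recursively
-- runsFrom f ps = (data continuing the run whose file value is f, the remaining groups)
def runsFrom (f : String) : List (String × String) → List String × List (List String)
  | [] => ([], [])
  | (f1, d1) :: t =>
    let r := runsFrom f1 t
    if f1 = f then (d1 :: r.1, r.2) else ([], (d1 :: r.1) :: r.2)

def joinG (gs : List (List String)) : List String :=
  (gs.foldl joinStep ([], true)).1

theorem joinFoldl_false (gs : List (List String)) (acc : List String) :
    (gs.foldl joinStep (acc, false)).1 = acc ++ gs.flatMap (fun g => "\n" :: g) := by
  induction gs generalizing acc with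
  | nil => simp
  | cons g gs ih => simp [joinStep, ih, List.append_assoc]

theorem joinG_cons (g : List String) (gs : List (List String)) :
    joinG (g :: gs) = g ++ gs.flatMap (fun grp => "\n" :: grp) := by
  simp [joinG, joinStep, joinFoldl_false]

theorem splitFoldl_runsFrom (ps : List (String × String)) :
    ∀ (gs : List (List String)) (cur : List String) (f : String),
      (ps.foldl splitStep (gs ++ [cur], some f)).1
        = gs ++ (cur ++ (runsFrom f ps).1) :: (runsFrom f ps).2 := by
  induction ps with
  | nil => intro gs cur f; simp [runsFrom]
  | cons p t ih =>
    obtain ⟨f1, d1⟩ := p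
    intro gs cur f
    by_cases hf : f1 = f
    · subst hf
      have hstep : splitStep (gs ++ [cur], some f1) (f1, d1) = (gs ++ [cur ++ [d1]], some f1) := by
        simp [splitStep]
      rw [List.foldl_cons, hstep, ih gs (cur ++ [d1]) f1]
      simp [runsFrom]
    · have hstep : splitStep (gs ++ [cur], some f) (f1, d1) = ((gs ++ [cur]) ++ [[d1]], some f1) := by
        simp [splitStep, fun h : f1 = f => hf h, List.append_assoc]
      rw [List.foldl_cons, hstep, ih (gs ++ [cur]) [d1] f1]
      simp [runsFrom, hf]

theorem joinG_runsFrom (ps : List (String × String)) :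
    ∀ (f0 d0 : String),
      joinG ((d0 :: (runsFrom f0 ps).1) :: (runsFrom f0 ps).2) = pairSpec ((f0, d0) :: ps) := by
  induction ps with
  | nil => intro f0 d0; simp [runsFrom, joinG_cons, pairSpec]
  | cons q t ih =>
    obtain ⟨f1, d1⟩ := q
    intro f0 d0
    by_cases hf : f1 = f0
    · subst hf
      have hr : runsFrom f1 ((f1, d1) :: t) = (d1 :: (runsFrom f1 t).1, (runsFrom f1 t).2) := by
        simp [runsFrom]
      rw [hr, pairSpec]
      simp only [ne_eq, not_true_eq_false, if_neg, not_false_iff]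
      rw [← ih f1 d1, joinG_cons, joinG_cons]
      simp
    · have hr : runsFrom f0 ((f1, d1) :: t) = ([], (d1 :: (runsFrom f1 t).1) :: (runsFrom f1 t).2) := by
        simp [runsFrom, hf]
      rw [hr, pairSpec]
      have hne : f0 ≠ f1 := fun h => hf h.symm
      simp only [hne, ne_eq, if_pos, not_false_iff]
      rw [← ih f1 d1, joinG_cons, joinG_cons]
      simp

theorem alt_eq_pairSpec (fl dl : List String) :
    insert_space_alt fl dl = pairSpec (fl.zip dl) := by
  show joinG (((fl.zip dl).foldl splitStep ([], none)).1) = pairSpec (fl.zip dl)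
  cases hz : fl.zip dl with
  | nil => simp [joinG, pairSpec]
  | cons p t =>
    obtain ⟨f0, d0⟩ := p
    have hstep : splitStep (([] : List (List String)), none) (f0, d0) = ([[d0]], some f0) := by
      simp [splitStep]
    rw [List.foldl_cons, hstep]
    have := splitFoldl_runsFrom t [] [d0] f0
    simp only [List.nil_append] at this
    rw [this]
    exact joinG_runsFrom t f0 d0

-- ===== VERDICT (by name: the statement is the Claim_ definition above) =====
theorem insert_space_spec : Claim_equal_insert_space := by
  intro fl dl _ hpre
  unfold Spec_insert_space insert_space
  rw [alt_eq_pairSpec fl dl]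
  simpa using loop_eq_pairSpec fl dl hpre fl.length 0 (by omega)
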